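-- pv_equiv track=rewrite | github.com/jisujisu1232/aws_sg_firewall_analyzer | sg_firewall_maker.py | grouping_ip_range
-- ===== SOURCE A (Python) =====
-- def grouping_ip_range(ip_ranges):
--     origin_len = len(ip_ranges)
--
--     ip_ranges.sort()
--     final_ip_ranges = []
--     final_ip_ranges.append(ip_ranges[0])
--     prev_ip_prefix = ip_ranges[0]
--     prev_len = len(ip_ranges[0])
--     for ip in  ip_ranges[1:]:
--         curr_len = len(ip)
--         curr_ip_prefix = ip
--         if prev_len==curr_len and curr_ip_prefix[:-1]==prev_ip_prefix[:-1]: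
--             final_ip_ranges.pop()
--             curr_ip_prefix = curr_ip_prefix[:-1]
--             final_ip_ranges.append(curr_ip_prefix)
--         else:
--             final_ip_ranges.append(curr_ip_prefix)
--         prev_ip_prefix = curr_ip_prefix
--         prev_len = curr_len
--     if origin_len != len(final_ip_ranges):
--         final_ip_ranges=grouping_ip_range(final_ip_ranges)
--
--     return final_ip_ranges
-- ===== SOURCE B (Python) =====
-- def grouping_ip_range(ip_ranges):
--     # Iterative fixpoint loop instead of recursion; carries the pending item
--     # separately instead of pop/append on the result list.
--     # Same in-place sort side effect on the caller's list as A on the first pass.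
--     ip_ranges.sort()
--     cur = ip_ranges
--     while True:
--         done = []
--         last = cur[0]
--         last_len = len(last)
--         merged = False
--         for ip in cur[1:]:
--             l = len(ip)
--             if l == last_len and ip[:-1] == last[:-1]:
--                 last = ip[:-1]
--                 last_len = l
--                 merged = True
--             else:
--                 done.append(last)
--                 last = ip
--                 last_len = l
--         done.append(last)
--         if not merged:
--             return done
--         cur = sorted(done)
-- ===== Notes on version B (the rewrite author's own statement) =====
-- stated objective: simpler
-- what changed: Replaced the recursion with an iterative fixpoint while-loop driven by a 'merged' flag, and replaced the pop/append manipulation of the result list by carrying the pending element in a separate variable that is appended only when it can no longer merge.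
-- outside the precondition, e.g. on grouping_ip_range([]): A raises IndexError, B raises IndexError
import Mathlib
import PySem

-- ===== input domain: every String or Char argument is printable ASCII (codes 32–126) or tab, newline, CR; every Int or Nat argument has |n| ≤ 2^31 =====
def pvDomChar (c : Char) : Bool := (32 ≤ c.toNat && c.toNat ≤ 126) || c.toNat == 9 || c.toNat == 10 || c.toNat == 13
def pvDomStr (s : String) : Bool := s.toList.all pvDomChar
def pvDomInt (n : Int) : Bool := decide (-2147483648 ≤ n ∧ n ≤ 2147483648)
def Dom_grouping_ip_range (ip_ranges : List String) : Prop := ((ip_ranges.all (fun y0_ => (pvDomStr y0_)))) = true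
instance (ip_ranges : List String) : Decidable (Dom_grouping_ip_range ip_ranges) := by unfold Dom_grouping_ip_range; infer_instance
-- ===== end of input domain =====

-- B replaces A's recursion by an iterative fixpoint loop with a 'merged' flag and carries
-- the pending element instead of pop/append (objective: simpler); return values proved
-- equal — both A and B also sort the caller's list in place (same side effect).

-- ===== PORT A =====
-- A's for-loop: state = (final_ip_ranges, prev_ip_prefix, prev_len); pop()+append = dropLast ++ [·].
def groupPassA : List String → List String → String → Int → List String
  | [], final, _, _ => final
  | ip :: rest, final, prev, prevLen =>
    let currLen := PySem.Str.len ip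
    if prevLen == currLen && PySem.Str.slice ip none (some (-1)) == PySem.Str.slice prev none (some (-1)) then
      let c := PySem.Str.slice ip none (some (-1))
      groupPassA rest (final.dropLast ++ [c]) c currLen
    else
      groupPassA rest (final ++ [ip]) ip currLen

-- used by the port's decreasing_by: one pass adds at most one element per step
theorem groupPassA_length (rest : List String) : ∀ (final : List String) (prev : String) (prevLen : Int),
    (groupPassA rest final prev prevLen).length ≤ final.length + rest.length := by
  induction rest with
  | nil => intro final prev prevLen; simp [groupPassA]
  | cons ip rest ih =>
    intro final prev prevLen
    simp only [groupPassA]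
    split
    · have h1 := ih (final.dropLast ++ [PySem.Str.slice ip none (some (-1))])
        (PySem.Str.slice ip none (some (-1))) (PySem.Str.len ip)
      have hdl : final.dropLast.length ≤ final.length := by
        simp
      simp only [List.length_append, List.length_cons, List.length_nil] at *
      omega
    · have h1 := ih (final ++ [ip]) ip (PySem.Str.len ip)
      simp only [List.length_append, List.length_cons, List.length_nil] at *
      omega

def grouping_ip_range (ip_ranges : List String) : List String :=
  let originLen := ip_ranges.length
  match hs : PySem.List.sorted ip_ranges (fun x => x) false with
  | [] => []   -- Python A raises IndexError on ip_ranges[0] here; excluded by Pre_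
  | h0 :: rest =>
    let final := groupPassA rest [h0] h0 (PySem.Str.len h0)
    if hne : originLen ≠ final.length then grouping_ip_range final else final
termination_by ip_ranges.length
decreasing_by
  have h1 : final.length ≤ [h0].length + rest.length := groupPassA_length rest [h0] h0 (PySem.Str.len h0)
  have h4 : originLen = ip_ranges.length := rfl
  rw [h4] at hne
  have h5 : final.length = (groupPassA rest [h0] h0 (PySem.Str.len h0)).length := rfl
  have h2 : (PySem.List.sorted ip_ranges (fun x => x) false).length = ip_ranges.length :=
    PySem.List.length_sorted ip_ranges (fun x => x) false
  rw [hs] at h2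
  simp only [List.length_cons, List.length_nil] at *
  omega

-- ===== PORT B =====
-- B's for-loop: state = (done, last, last_len, merged); 'merged' is sticky.
def groupPassB : List String → List String → String → Int → Bool → List String × String × Bool
  | [], done, last, _, merged => (done, last, merged)
  | ip :: rest, done, last, lastLen, merged =>
    let l := PySem.Str.len ip
    if l == lastLen && PySem.Str.slice ip none (some (-1)) == PySem.Str.slice last none (some (-1)) then
      groupPassB rest done (PySem.Str.slice ip none (some (-1))) l true
    else
      groupPassB rest (done ++ [last]) ip l merged

-- the 'merged' flag is only ever set, never cleared
theorem groupPassB_sticky (rest : List String) : ∀ (done : List String) (last : String) (lastLen : Int),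
    (groupPassB rest done last lastLen true).2.2 = true := by
  induction rest with
  | nil => intro done last lastLen; simp [groupPassB]
  | cons ip rest ih =>
    intro done last lastLen
    simp only [groupPassB]
    split
    · exact ih _ _ _
    · exact ih _ _ _

-- used by the port's decreasing_by: a pass that set 'merged' produced a strictly shorter list
theorem groupPassB_length (rest : List String) : ∀ (done : List String) (last : String) (lastLen : Int) (merged : Bool),
    (groupPassB rest done last lastLen merged).1.length ≤ done.length + rest.length ∧
    ((groupPassB rest done last lastLen merged).2.2 = false →
      (groupPassB rest done last lastLen merged).1.length = done.length + rest.length) ∧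
    (merged = false → (groupPassB rest done last lastLen merged).2.2 = true →
      (groupPassB rest done last lastLen merged).1.length < done.length + rest.length) := by
  induction rest with
  | nil =>
    intro done last lastLen merged
    refine ⟨by simp [groupPassB], by simp [groupPassB], ?_⟩
    intro h1 h2
    simp only [groupPassB] at h2
    rw [h1] at h2
    exact absurd h2 (by simp)
  | cons ip rest ih =>
    intro done last lastLen merged
    simp only [groupPassB]
    split
    · obtain ⟨b1, _, _⟩ := ih done (PySem.Str.slice ip none (some (-1))) (PySem.Str.len ip) true
      have hst := groupPassB_sticky rest done (PySem.Str.slice ip none (some (-1))) (PySem.Str.len ip)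
      refine ⟨?_, fun h => absurd (h.symm.trans hst) (by decide), fun _ _ => ?_⟩
      · simp only [List.length_cons]; omega
      · simp only [List.length_cons]; omega
    · obtain ⟨b1, b2, b3⟩ := ih (done ++ [last]) ip (PySem.Str.len ip) merged
      simp only [List.length_append, List.length_cons, List.length_nil] at b1 b2 b3
      refine ⟨?_, fun h => ?_, fun h1 h2 => ?_⟩
      · simp only [List.length_cons]; omega
      · simp only [List.length_cons]; have := b2 h; omega
      · simp only [List.length_cons]; have := b3 h1 h2; omega

def groupLoopB (cur : List String) : List String :=
  match cur with
  | [] => []   -- Python B raises IndexError on cur[0] here; excluded by Pre_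
  | h0 :: rest =>
    match hp : groupPassB rest [] h0 (PySem.Str.len h0) false with
    | (done, last, true) => groupLoopB (PySem.List.sorted (done ++ [last]) (fun x => x) false)
    | (done, last, false) => done ++ [last]
termination_by cur.length
decreasing_by
  have h := groupPassB_length rest [] h0 (PySem.Str.len h0) false
  rw [hp] at h
  have h3 := h.2.2 rfl rfl
  have h2 : (PySem.List.sorted (done ++ [last]) (fun x => x) false).length = (done ++ [last]).length :=
    PySem.List.length_sorted _ (fun x => x) false
  simp only [List.length_append, List.length_cons, List.length_nil] at *
  omega

def grouping_ip_range_alt (ip_ranges : List String) : List String :=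
  groupLoopB (PySem.List.sorted ip_ranges (fun x => x) false)

-- ===== PRECONDITION & SPEC =====
-- Pre_ excludes only the empty list, on which Python A (and B) raises IndexError at ip_ranges[0].
def Pre_grouping_ip_range (ip_ranges : List String) : Prop := ip_ranges ≠ []
instance (ip_ranges : List String) : Decidable (Pre_grouping_ip_range ip_ranges) := by unfold Pre_grouping_ip_range; infer_instance
def pvWitness_grouping_ip_range : List String := ["10.0.0.", "10.0.1."]

def Spec_grouping_ip_range (ip_ranges : List String) (out : List String) : Prop := out = grouping_ip_range_alt ip_ranges
instance (ip_ranges : List String) (out : List String) : Decidable (Spec_grouping_ip_range ip_ranges out) := by unfold Spec_grouping_ip_range; infer_instance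

-- ===== CLAIM (what is proved, stated in full; the proofs are below) =====
def Claim_equal_grouping_ip_range : Prop := ∀ (ip_ranges : List String), Dom_grouping_ip_range ip_ranges → Pre_grouping_ip_range ip_ranges → Spec_grouping_ip_range ip_ranges (grouping_ip_range ip_ranges)

-- ===== LEMMAS AND PROOFS =====

-- A's pop/append pass equals B's pending-element pass: A's final list is B's done ++ [last].
theorem pass_rel (rest : List String) : ∀ (done : List String) (prev : String) (pl : Int) (m : Bool),
    groupPassA rest (done ++ [prev]) prev pl =
      (groupPassB rest done prev pl m).1 ++ [(groupPassB rest done prev pl m).2.1] := by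
  induction rest with
  | nil => intro done prev pl m; simp [groupPassA, groupPassB]
  | cons ip rest ih =>
    intro done prev pl m
    simp only [groupPassA, groupPassB]
    by_cases hL : pl = PySem.Str.len ip
    · by_cases hS : PySem.Str.slice ip none (some (-1)) = PySem.Str.slice prev none (some (-1))
      · rw [if_pos (by simp [hL, hS]), if_pos (by simp [hL, hS]), List.dropLast_concat]
        exact ih done _ _ true
      · rw [if_neg (by simp only [Bool.and_eq_true, beq_iff_eq]; exact fun h => hS h.2),
            if_neg (by simp only [Bool.and_eq_true, beq_iff_eq]; exact fun h => hS h.2)]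
        have := ih (done ++ [prev]) ip (PySem.Str.len ip) m
        simpa using this
    · rw [if_neg (by simp only [Bool.and_eq_true, beq_iff_eq]; exact fun h => hL h.1),
          if_neg (by simp only [Bool.and_eq_true, beq_iff_eq]; exact fun h => hL h.1.symm)]
      have := ih (done ++ [prev]) ip (PySem.Str.len ip) m
      simpa using this

theorem groupLoopB_cons (h0 : String) (rest : List String) :
    groupLoopB (h0 :: rest) =
      (match groupPassB rest [] h0 (PySem.Str.len h0) false with
        | (done, last, true) => groupLoopB (PySem.List.sorted (done ++ [last]) (fun x => x) false)
        | (done, last, false) => done ++ [last]) := by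
  rw [groupLoopB.eq_def]
  split
  next heq => exact absurd heq (by simp)
  next d ll heq =>
    injection heq with h1 h2
    subst h1; subst h2
    split
    next d2 l2 heq2 => rw [heq2]
    next d2 l2 heq2 => rw [heq2]

theorem mainEq : ∀ (n : Nat) (xs : List String), xs.length ≤ n →
    grouping_ip_range xs = groupLoopB (PySem.List.sorted xs (fun x => x) false) := by
  intro n
  induction n with
  | zero =>
    intro xs hx
    have hxs : xs = [] := List.length_eq_zero_iff.mp (Nat.le_zero.mp hx)
    subst hxs
    rw [grouping_ip_range.eq_def, groupLoopB.eq_def]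
    rfl
  | succ n ih =>
    intro xs hx
    rw [grouping_ip_range.eq_def]
    split
    next hs => rw [groupLoopB.eq_def, hs]
    next h0 rest hs =>
      have hxs : xs.length = rest.length + 1 := by
        have h2 := PySem.List.length_sorted xs (fun x => x) false
        rw [hs] at h2; simpa using h2.symm
      have hrel := pass_rel rest [] h0 (PySem.Str.len h0) false
      simp only [List.nil_append] at hrel
      have hlen := groupPassB_length rest [] h0 (PySem.Str.len h0) false
      rw [hs, groupLoopB_cons]
      rcases hPB : groupPassB rest [] h0 (PySem.Str.len h0) false with ⟨d, l, m⟩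
      rw [hPB] at hrel hlen
      simp only at hrel hlen
      cases m with
      | true =>
        have hlt : d.length < rest.length := by simpa using hlen.2.2 (by trivial) (by trivial)
        have hcond : xs.length ≠ (groupPassA rest [h0] h0 (PySem.Str.len h0)).length := by
          rw [hrel]
          simp only [List.length_append, List.length_cons, List.length_nil]
          omega
        rw [dif_pos hcond, hrel]
        exact ih (d ++ [l]) (by
          simp only [List.length_append, List.length_cons, List.length_nil]; omega)
      | false =>
        have hd : d.length = rest.length := by simpa using hlen.2.1 (by trivial)
        have hcond : ¬ xs.length ≠ (groupPassA rest [h0] h0 (PySem.Str.len h0)).length := by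
          rw [hrel]
          simp only [ne_eq, List.length_append, List.length_cons, List.length_nil]
          omega
        rw [dif_neg hcond, hrel]

-- ===== VERDICT (by name: the statement is the Claim_ definition above) =====
theorem grouping_ip_range_spec : Claim_equal_grouping_ip_range := by
  intro xs _ _
  unfold Spec_grouping_ip_range grouping_ip_range_alt
  exact mainEq xs.length xs le_rfl
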